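-- pv_equiv track=rewrite | github.com/farhannadim311/sat | lab.py | no_oversubscribed_rooms
-- ===== SOURCE A (Python) =====
-- def combine(lst, k, start=0, path=None, result=None):
--     """
--     Recursively generate all combinations of k elements from lst.
--     """
--     if path is None:
--         path = []
--     if result is None:
--         result = []
--
--     if len(path) == k:
--         result.append(path[:])
--         return result
--
--     for i in range(start, len(lst)):
--         path.append(lst[i])
--         combine(lst, k, i + 1, path, result)
--         path.pop()
--
--     return result
--
-- def no_oversubscribed_rooms(students_preferences, room_capacities):
--     """
--     Generate CNF formula to ensure no room has more students than its capacity.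
--
--     Args:
--         students (list[str]): List of all student names.
--         room_capacities (dict[str, int]): Mapping from room names to their capacities.
--
--     Returns:
--         list[list[tuple[str, bool]]]: CNF clauses, each preventing c+1 students from sharing a room.
--     """
--     cnf = []
--     total_students = len(students_preferences)
--     students = list(students_preferences.keys())
--     for room in room_capacities:
--         cap = room_capacities[room]
--         if cap >= total_students:
--             continue
--         student_groups = combine(students, cap + 1)
--         for group in student_groups:
--             clause = []
--             for student in group:
--                 clause.append((student + "_" + room, False))
--             cnf.append(clause)
--     return cnf
-- ===== SOURCE B (Python) =====
-- def _groups(students, k):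
--     """All k-element combinations of students, in lexicographic index order,
--     generated iteratively by advancing an index vector."""
--     n = len(students)
--     if k < 0 or k > n:
--         return []
--     idx = list(range(k))
--     out = []
--     while True:
--         out.append([students[j] for j in idx])
--         i = k - 1
--         while i >= 0 and idx[i] == n - k + i:
--             i -= 1
--         if i < 0:
--             return out
--         idx[i] += 1
--         for j in range(i + 1, k):
--             idx[j] = idx[j - 1] + 1
--
--
-- def no_oversubscribed_rooms(students_preferences, room_capacities):
--     students = list(students_preferences)
--     n = len(students)
--     cnf = []
--     for room in room_capacities:
--         cap = room_capacities[room]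
--         if cap >= n:
--             continue
--         cnf.extend([(s + "_" + room, False) for s in group]
--                    for group in _groups(students, cap + 1))
--     return cnf
-- ===== Notes on version B (the rewrite author's own statement) =====
-- stated objective: alternative
-- what changed: The recursive backtracking generator `combine` (shared mutable path with append/pop and a recursive index loop) is replaced by an iterative index-vector generator that repeatedly emits the current group and advances the rightmost incrementable index, resetting the suffix to consecutive values; the outer room loop, the cap >= total skip and the clause format are kept.
import Mathlib
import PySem

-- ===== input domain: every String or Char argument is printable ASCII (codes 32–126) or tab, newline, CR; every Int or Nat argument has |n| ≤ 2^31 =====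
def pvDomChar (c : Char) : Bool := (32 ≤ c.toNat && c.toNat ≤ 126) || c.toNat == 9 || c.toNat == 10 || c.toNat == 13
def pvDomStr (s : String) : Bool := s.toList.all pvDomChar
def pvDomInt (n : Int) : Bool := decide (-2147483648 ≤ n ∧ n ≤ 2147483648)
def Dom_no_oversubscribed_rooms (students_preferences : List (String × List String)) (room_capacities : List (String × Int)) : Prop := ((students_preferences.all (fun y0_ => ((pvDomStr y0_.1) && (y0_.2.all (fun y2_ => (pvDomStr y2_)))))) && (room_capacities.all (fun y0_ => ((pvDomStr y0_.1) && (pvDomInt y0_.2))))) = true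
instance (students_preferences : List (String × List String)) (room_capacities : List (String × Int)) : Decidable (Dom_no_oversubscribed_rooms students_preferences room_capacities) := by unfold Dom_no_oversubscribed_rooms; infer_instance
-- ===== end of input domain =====

-- B replaces A's recursive backtracking combination generator by an iterative
-- index-vector generator (emit group, advance rightmost incrementable index,
-- reset the suffix to consecutive values); same values, same clause order.

-- ===== PORT A =====
-- `combine(lst, k, start, path, result)`: the `for i in range(start, len(lst))`
-- loop with a recursive call per iteration.  The loop is transliterated as a
-- structural recursion on a fuel counter `m` (= an upper bound on the remaining
-- iterations, a totality guard only); each iteration performs the recursive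
-- call's body (the `len(path) == k` test, then the nested loop) and continues;
-- `path`/`result` are threaded as the same values (`path[:]` append = `result ++ [path]`).
def combineLoop (lst : List String) (k : Int) : Nat → Nat → List String → List (List String) → List (List String)
  | 0, _, _, result => result
  | m + 1, i, path, result =>
    if i < lst.length then
      combineLoop lst k m (i + 1) path
        (if ((path ++ [lst.getD i ""]).length : Int) = k then result ++ [path ++ [lst.getD i ""]]
         else combineLoop lst k m (i + 1) (path ++ [lst.getD i ""]) result)
    else result

def combine (lst : List String) (k : Int) : List (List String) :=
  if (((([] : List String)).length : Int)) = k then [] ++ [([] : List String)]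
  else combineLoop lst k lst.length 0 [] []

def no_oversubscribed_rooms (students_preferences : List (String × List String)) (room_capacities : List (String × Int)) : List (List (String × Bool)) :=
  let spd := PySem.Dict.ofList students_preferences
  let rcd := PySem.Dict.ofList room_capacities
  let total : Int := (spd.size : Int)       -- len(students_preferences)
  let students := spd.keys                  -- list(students_preferences.keys())
  rcd.keys.foldl
    (fun cnf room =>
      let cap := rcd.getD room 0
      if total ≤ cap then cnf               -- `continue`
      else
        (combine students (cap + 1)).foldl
          (fun cnf2 group =>
            cnf2 ++ [group.foldl (fun clause s => clause ++ [(s ++ "_" ++ room, false)]) []])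
          cnf)
    []

-- ===== PORT B =====
-- `for j in range(i+1, k): idx[j] = idx[j-1] + 1` writes the consecutive run
-- idx[i]+1, idx[i]+2, …  (consecFrom is that run)
def consecFrom (s : Nat) : Nat → List Nat
  | 0 => []
  | l + 1 => s :: consecFrom (s + 1) l

-- `i = k - 1; while i >= 0 and idx[i] == n - k + i: i -= 1` — downward scan;
-- argument = i + 1, result = the i at which the scan stops (none = `i < 0`).
def bScan (idx : List Nat) (n k : Nat) : Nat → Option Nat
  | 0 => none
  | i + 1 => if idx.getD i 0 = n - k + i then bScan idx n k i else some i

-- `idx[i] += 1` followed by the reset loop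
def bReset (idx : List Nat) (i : Nat) : List Nat :=
  idx.take i ++ consecFrom (idx.getD i 0 + 1) (idx.length - i)

-- the `while True` loop of _groups (fuel = totality guard only)
def bLoop (students : List String) (n k : Nat) : Nat → List Nat → List (List String)
  | 0, _ => []
  | fuel + 1, idx =>
    idx.map (fun j => students.getD j "") ::
      (match bScan idx n k k with
       | none => []
       | some i => bLoop students n k fuel (bReset idx i))

def bGroups (students : List String) (k : Int) : List (List String) :=
  if k < 0 ∨ (students.length : Int) < k then []
  else bLoop students students.length k.toNat (2 ^ students.length) (List.range k.toNat)

def no_oversubscribed_rooms_alt (students_preferences : List (String × List String)) (room_capacities : List (String × Int)) : List (List (String × Bool)) :=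
  let spd := PySem.Dict.ofList students_preferences
  let rcd := PySem.Dict.ofList room_capacities
  let students := spd.keys
  rcd.keys.foldl
    (fun cnf room =>
      let cap := rcd.getD room 0
      if (students.length : Int) ≤ cap then cnf
      else cnf ++ (bGroups students (cap + 1)).map
        (fun g => g.map (fun s => (s ++ "_" ++ room, false))))
    []

-- ===== PRECONDITION & SPEC =====
def Spec_no_oversubscribed_rooms (students_preferences : List (String × List String)) (room_capacities : List (String × Int)) (out : List (List (String × Bool))) : Prop := out = no_oversubscribed_rooms_alt students_preferences room_capacities
instance (students_preferences : List (String × List String)) (room_capacities : List (String × Int)) (out : List (List (String × Bool))) : Decidable (Spec_no_oversubscribed_rooms students_preferences room_capacities out) := by unfold Spec_no_oversubscribed_rooms; infer_instance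

-- ===== CLAIM (what is proved, stated in full; the proofs are below) =====
def Claim_equal_no_oversubscribed_rooms : Prop := ∀ (students_preferences : List (String × List String)) (room_capacities : List (String × Int)), Dom_no_oversubscribed_rooms students_preferences room_capacities → Spec_no_oversubscribed_rooms students_preferences room_capacities (no_oversubscribed_rooms students_preferences room_capacities)

-- ===== LEMMAS AND PROOFS =====

-- Canonical middle object: the k-element index combinations of {a, …, n-1},
-- in lexicographic order (CPython's itertools order).
def idxC (a n k : Nat) : List (List Nat) :=
  PySem.List.combinations (List.range' a (n - a)) k

-- Valid index-vector states: strictly increasing, entries ≥ lo, entry j ≤ n - k + j.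
def Vv (n : Nat) : Nat → List Nat → Prop
  | _, [] => True
  | lo, h :: t => lo ≤ h ∧ h + t.length < n ∧ Vv n (h + 1) t

-- The suffix of idxC a n idx.length that starts at state idx.
def sfx (n : Nat) : Nat → List Nat → List (List Nat)
  | _, [] => [[]]
  | a, h :: t =>
    if _h : n ≤ a then []
    else if h = a then (sfx n (a + 1) t).map (a :: ·) ++ idxC (a + 1) n (t.length + 1)
    else sfx n (a + 1) (h :: t)
termination_by a _idx => n - a
decreasing_by all_goals omega

lemma idxC_zero (a n : Nat) : idxC a n 0 = [[]] := by
  simp [idxC, PySem.List.combinations_zero]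

lemma idxC_succ (a n k : Nat) (h : a < n) :
    idxC a n (k + 1) = (idxC (a + 1) n k).map (a :: ·) ++ idxC (a + 1) n (k + 1) := by
  have h2 : n - a = (n - (a + 1)) + 1 := by omega
  rw [idxC, h2, List.range'_succ, PySem.List.combinations_cons_succ]
  rfl

lemma idxC_nil (a n k : Nat) (h : n - a < k) : idxC a n k = [] := by
  unfold idxC
  apply PySem.List.combinations_eq_nil_of_length_lt
  simpa [List.length_range'] using h

lemma consecFrom_succ (s l : Nat) : consecFrom s (l + 1) = s :: consecFrom (s + 1) l := rfl

lemma length_consecFrom (s l : Nat) : (consecFrom s l).length = l := by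
  induction l generalizing s with
  | zero => rfl
  | succ l ih => simp [consecFrom, ih]

lemma consecFrom_eq_map (l s : Nat) : consecFrom s l = (List.range l).map (s + ·) := by
  induction l generalizing s with
  | zero => simp [consecFrom]
  | succ l ih =>
    rw [consecFrom_succ, ih, List.range_succ_eq_map, List.map_cons, List.map_map]
    refine congrArg₂ _ rfl ?_
    apply List.map_congr_left
    intro x _
    simp only [Function.comp_apply]
    omega

lemma range_eq_consecFrom (k : Nat) : List.range k = consecFrom 0 k := by
  simp [consecFrom_eq_map]

lemma cI_empty (n i : Nat) (d : Int) (hni : n ≤ i) (hd : d ≠ 0) :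
    (if d < 0 then [] else idxC i n d.toNat) = ([] : List (List Nat)) := by
  by_cases h : d < 0
  · simp [h]
  · rw [if_neg h]; exact idxC_nil _ _ _ (by omega)

-- ---- A-side characterization ----
lemma A_loop (lst : List String) (k : Int) :
    ∀ (m i : Nat) (path : List String) (result : List (List String)),
      lst.length ≤ i + m → (path.length : Int) ≠ k →
      combineLoop lst k m i path result =
        result ++ (if k - (path.length : Int) < 0 then []
                   else idxC i lst.length (k - (path.length : Int)).toNat).map
          (fun c => path ++ c.map (fun j => lst.getD j "")) := by
  intro m
  induction m with
  | zero =>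
    intro i path result hle hne
    rw [cI_empty lst.length i _ (by omega) (by omega)]
    simp [combineLoop]
  | succ m ih =>
    intro i path result hle hne
    simp only [combineLoop]
    by_cases hi : i < lst.length
    · rw [if_pos hi]
      have hgo : (if ((path ++ [lst.getD i ""]).length : Int) = k then
              result ++ [path ++ [lst.getD i ""]]
            else combineLoop lst k m (i + 1) (path ++ [lst.getD i ""]) result) =
          result ++ (if k - ((path ++ [lst.getD i ""]).length : Int) < 0 then []
                     else idxC (i + 1) lst.length (k - ((path ++ [lst.getD i ""]).length : Int)).toNat).map
            (fun c => (path ++ [lst.getD i ""]) ++ c.map (fun j => lst.getD j "")) := by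
        by_cases hk2 : (((path ++ [lst.getD i ""]).length : Int)) = k
        · rw [if_pos hk2]
          have hz : k - ((path ++ [lst.getD i ""]).length : Int) = 0 := sub_eq_zero_of_eq hk2.symm
          rw [hz]
          simp [idxC_zero]
        · rw [if_neg hk2]
          exact ih (i + 1) _ result (by omega) hk2
      rw [hgo, ih (i + 1) path _ (by omega) hne]
      have hlen : ((path ++ [lst.getD i ""]).length : Int) = (path.length : Int) + 1 := by
        simp
      rw [hlen]
      by_cases hd : k - (path.length : Int) < 0
      · have hd' : k - ((path.length : Int) + 1) < 0 := by omega
        simp [hd, hd']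
      · have hd0 : 0 < k - (path.length : Int) := by omega
        have hd' : ¬ k - ((path.length : Int) + 1) < 0 := by omega
        have ht : (k - (path.length : Int)).toNat = (k - ((path.length : Int) + 1)).toNat + 1 := by
          omega
        have e1 : (if k - ((path.length : Int) + 1) < 0 then []
              else idxC (i + 1) lst.length (k - ((path.length : Int) + 1)).toNat) =
            idxC (i + 1) lst.length (k - ((path.length : Int) + 1)).toNat := if_neg hd'
        have e3 : (if k - (path.length : Int) < 0 then ([] : List (List Nat))
              else idxC (i + 1) lst.length (k - (path.length : Int)).toNat) =
            idxC (i + 1) lst.length ((k - ((path.length : Int) + 1)).toNat + 1) := by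
          rw [if_neg hd, ht]
        have e2 : (if k - (path.length : Int) < 0 then ([] : List (List Nat))
              else idxC i lst.length (k - (path.length : Int)).toNat) =
            (idxC (i + 1) lst.length (k - ((path.length : Int) + 1)).toNat).map (i :: ·) ++
              idxC (i + 1) lst.length ((k - ((path.length : Int) + 1)).toNat + 1) := by
          rw [if_neg hd, ht, idxC_succ _ _ _ hi]
        rw [e1, e3, e2]
        simp [List.map_append, List.map_map, List.append_assoc, Function.comp_def]
    · rw [if_neg hi]
      rw [cI_empty lst.length i _ (by omega) (by omega)]
      simp

lemma A_main (lst : List String) (k : Int) :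
    combine lst k =
      (if k < 0 then [] else idxC 0 lst.length k.toNat).map
        (fun c => c.map (fun j => lst.getD j "")) := by
  unfold combine
  by_cases hk : ((List.length ([] : List String) : Int)) = k
  · rw [if_pos hk]
    have hk0 : k = 0 := by simpa using hk.symm
    subst hk0
    simp [idxC_zero]
  · rw [if_neg hk, A_loop lst k lst.length 0 [] [] (by omega) hk]
    have h0 : k - ((List.length ([] : List String) : Int)) = k := by simp
    rw [h0]
    simp


-- ---- B-side characterization ----
lemma bScan_lt (idx : List Nat) (n k : Nat) :
    ∀ j i, bScan idx n k j = some i → i < j := by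
  intro j
  induction j with
  | zero => intro i h; simp [bScan] at h
  | succ j ih =>
    intro i h
    unfold bScan at h
    split at h
    · have := ih i h; omega
    · cases h; omega

lemma bScan_cons (n k : Nat) (hk : 1 ≤ k) (hkn : k ≤ n) (h : Nat) (t : List Nat) :
    ∀ j, bScan (h :: t) n k (j + 1) =
      (match bScan t n (k - 1) j with
       | some m => some (m + 1)
       | none => if h = n - k then none else some 0) := by
  intro j
  induction j with
  | zero => simp [bScan]
  | succ j ih =>
    have hb : n - k + (j + 1) = n - (k - 1) + j := by omega
    show (if (h :: t).getD (j + 1) 0 = n - k + (j + 1) then bScan (h :: t) n k (j + 1)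
          else some (j + 1)) = _
    rw [List.getD_cons_succ, hb]
    by_cases hc : t.getD j 0 = n - (k - 1) + j
    · rw [if_pos hc, ih]
      show _ = (match (if t.getD j 0 = n - (k - 1) + j then bScan t n (k - 1) j else some j) with
        | some m => some (m + 1)
        | none => if h = n - k then none else some 0)
      rw [if_pos hc]
    · rw [if_neg hc]
      show _ = (match (if t.getD j 0 = n - (k - 1) + j then bScan t n (k - 1) j else some j) with
        | some m => some (m + 1)
        | none => if h = n - k then none else some 0)
      rw [if_neg hc]

lemma bReset_zero (h : Nat) (t : List Nat) :
    bReset (h :: t) 0 = consecFrom (h + 1) (t.length + 1) := by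
  simp [bReset]

lemma bReset_succ (h : Nat) (t : List Nat) (m : Nat) :
    bReset (h :: t) (m + 1) = h :: bReset t m := by
  simp [bReset, List.take_succ_cons]

lemma length_bReset (idx : List Nat) (i : Nat) (h : i < idx.length) :
    (bReset idx i).length = idx.length := by
  simp [bReset, length_consecFrom]; omega

lemma Vv_consecFrom (n : Nat) : ∀ (l lo s : Nat), lo ≤ s → s + l ≤ n →
    Vv n lo (consecFrom s l) := by
  intro l
  induction l with
  | zero => intro lo s _ _; simp [consecFrom, Vv]
  | succ l ih =>
    intro lo s hlos hsl
    rw [consecFrom_succ]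
    show lo ≤ s ∧ s + (consecFrom (s + 1) l).length < n ∧ Vv n (s + 1) (consecFrom (s + 1) l)
    refine ⟨hlos, ?_, ih (s + 1) (s + 1) le_rfl (by omega)⟩
    rw [length_consecFrom]; omega

lemma Vv_bReset (n : Nat) :
    ∀ (idx : List Nat) (lo i : Nat), Vv n lo idx →
      bScan idx n idx.length idx.length = some i → Vv n lo (bReset idx i) := by
  intro idx
  induction idx with
  | nil => intro lo i _ hs; simp [bScan] at hs
  | cons h t ih =>
    intro lo i hv hs
    obtain ⟨hlo, hbnd, hvt⟩ : lo ≤ h ∧ h + t.length < n ∧ Vv n (h + 1) t := hv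
    have hlen : (h :: t).length = t.length + 1 := rfl
    rw [hlen, bScan_cons n (t.length + 1) (by omega) (by omega) h t t.length] at hs
    simp only [Nat.add_sub_cancel] at hs
    cases hb : bScan t n t.length t.length with
    | some m =>
      rw [hb] at hs
      cases hs
      rw [bReset_succ]
      have hm : m < t.length := bScan_lt t n t.length t.length m hb
      exact ⟨hlo, by rw [length_bReset t m hm]; omega, ih (h + 1) m hvt hb⟩
    | none =>
      rw [hb] at hs
      by_cases hh : h = n - (t.length + 1)
      · rw [if_pos hh] at hs; cases hs
      · rw [if_neg hh] at hs
        cases hs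
        rw [bReset_zero]
        exact Vv_consecFrom n (t.length + 1) lo (h + 1) (by omega) (by omega)

lemma sfx_nil (n a : Nat) : sfx n a [] = [[]] := by
  unfold sfx; rfl

lemma sfx_cons_eq (n a : Nat) (t : List Nat) (hna : ¬ n ≤ a) :
    sfx n a (a :: t) = (sfx n (a + 1) t).map (a :: ·) ++ idxC (a + 1) n (t.length + 1) := by
  conv_lhs => unfold sfx
  simp [hna]

lemma sfx_cons_ne (n a h : Nat) (t : List Nat) (hna : ¬ n ≤ a) (hh : h ≠ a) :
    sfx n a (h :: t) = sfx n (a + 1) (h :: t) := by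
  conv_lhs => unfold sfx
  simp [hna, hh]

lemma sfx_first (n : Nat) : ∀ (k a : Nat), a + k ≤ n →
    sfx n a (consecFrom a k) = idxC a n k := by
  intro k
  induction k with
  | zero => intro a _; simp [consecFrom, sfx_nil, idxC_zero]
  | succ k ih =>
    intro a hk
    rw [consecFrom_succ, sfx_cons_eq n a _ (by omega), length_consecFrom,
      ih (a + 1) (by omega), idxC_succ a n k (by omega)]

lemma sfx_step (n : Nat) : ∀ (a : Nat) (idx : List Nat), Vv n a idx →
    sfx n a idx = idx ::
      (match bScan idx n idx.length idx.length with
       | none => []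
       | some i => sfx n a (bReset idx i)) := by
  suffices H : ∀ (d a : Nat) (idx : List Nat), n ≤ a + d → Vv n a idx →
      sfx n a idx = idx ::
        (match bScan idx n idx.length idx.length with
         | none => []
         | some i => sfx n a (bReset idx i)) by
    exact fun a idx hv => H n a idx (by omega) hv
  intro d
  induction d with
  | zero =>
    intro a idx h0 hv
    cases idx with
    | nil => simp [sfx_nil, bScan]
    | cons h t =>
      obtain ⟨h1, h2, _⟩ : a ≤ h ∧ h + t.length < n ∧ Vv n (h + 1) t := hv
      omega
  | succ d ihd =>
    intro a idx hd hv
    cases idx with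
    | nil => simp [sfx_nil, bScan]
    | cons h t =>
      obtain ⟨hah, hbnd, hvt⟩ : a ≤ h ∧ h + t.length < n ∧ Vv n (h + 1) t := hv
      have hna : ¬ n ≤ a := by omega
      have hlen : (h :: t).length = t.length + 1 := rfl
      by_cases hha : h = a
      · subst hha
        rw [sfx_cons_eq n h t hna, hlen,
          bScan_cons n (t.length + 1) (by omega) (by omega) h t t.length]
        simp only [Nat.add_sub_cancel]
        cases hb : bScan t n t.length t.length with
        | some m =>
          have ht := ihd (h + 1) t (by omega) hvt
          rw [hb] at ht
          rw [ht]
          have hm : m < t.length := bScan_lt t n t.length t.length m hb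
          have hrw : sfx n h (h :: bReset t m) =
              (sfx n (h + 1) (bReset t m)).map (h :: ·) ++ idxC (h + 1) n ((bReset t m).length + 1) :=
            sfx_cons_eq n h (bReset t m) hna
          rw [length_bReset t m hm] at hrw
          simp [bReset_succ, hrw]
        | none =>
          have ht := ihd (h + 1) t (by omega) hvt
          rw [hb] at ht
          rw [ht]
          by_cases hedge : h = n - (t.length + 1)
          · have hnil : idxC (h + 1) n (t.length + 1) = [] := idxC_nil _ _ _ (by omega)
            rw [if_pos hedge]
            simp [hnil]
          · have hkey : sfx n h (bReset (h :: t) 0) = idxC (h + 1) n (t.length + 1) := by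
              rw [bReset_zero, consecFrom_succ,
                sfx_cons_ne n h (h + 1) _ hna (by omega), ← consecFrom_succ,
                sfx_first n (t.length + 1) (h + 1) (by omega)]
            simp [hedge, hkey]
      · rw [sfx_cons_ne n a h t hna hha]
        have hih := ihd (a + 1) (h :: t) (by omega) (⟨by omega, hbnd, hvt⟩ : Vv n (a + 1) (h :: t))
        rw [hih]
        cases hb : bScan (h :: t) n (h :: t).length (h :: t).length with
        | none => simp
        | some i =>
          congr 1
          cases i with
          | zero =>
            show sfx n (a + 1) (bReset (h :: t) 0) = sfx n a (bReset (h :: t) 0)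
            rw [bReset_zero, consecFrom_succ]
            exact (sfx_cons_ne n a (h + 1) _ hna (by omega)).symm
          | succ m =>
            show sfx n (a + 1) (bReset (h :: t) (m + 1)) = sfx n a (bReset (h :: t) (m + 1))
            rw [bReset_succ]
            exact (sfx_cons_ne n a h _ hna hha).symm


lemma length_combinations_le {α : Type} (xs : List α) :
    ∀ r, (PySem.List.combinations xs r).length ≤ 2 ^ xs.length := by
  induction xs with
  | nil =>
    intro r
    cases r with
    | zero => simp [PySem.List.combinations_zero]
    | succ r => simp [PySem.List.combinations_nil_succ]
  | cons x xs ih =>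
    intro r
    cases r with
    | zero => simp [PySem.List.combinations_zero, Nat.one_le_two_pow]
    | succ r =>
      rw [PySem.List.combinations_cons_succ]
      have h1 := ih r
      have h2 := ih (r + 1)
      simp only [List.length_append, List.length_map, List.length_cons, pow_succ]
      omega

lemma B_loop (students : List String) (n : Nat) :
    ∀ (fuel : Nat) (idx : List Nat) (a : Nat), Vv n a idx →
      (sfx n a idx).length ≤ fuel →
      bLoop students n idx.length fuel idx =
        (sfx n a idx).map (fun c => c.map (fun j => students.getD j "")) := by
  intro fuel
  induction fuel with
  | zero =>
    intro idx a hv hf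
    rw [sfx_step n a idx hv] at hf
    simp at hf
  | succ fuel ih =>
    intro idx a hv hf
    rw [sfx_step n a idx hv]
    cases hb : bScan idx n idx.length idx.length with
    | none => simp [bLoop, hb]
    | some i =>
      have hi : i < idx.length := bScan_lt _ _ _ _ _ hb
      have hlen := length_bReset idx i hi
      have hfl : (sfx n a (bReset idx i)).length ≤ fuel := by
        rw [sfx_step n a idx hv, hb] at hf
        simpa using hf
      have := ih (bReset idx i) a (Vv_bReset n idx a i hv hb) hfl
      rw [hlen] at this
      simp [bLoop, hb, this]

lemma B_main (students : List String) (k : Int) :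
    bGroups students k =
      (if k < 0 then [] else idxC 0 students.length k.toNat).map
        (fun c => c.map (fun j => students.getD j "")) := by
  unfold bGroups
  by_cases hk : k < 0
  · simp [hk]
  · rw [if_neg hk]
    by_cases hn : (students.length : Int) < k
    · rw [if_pos (by omega : k < 0 ∨ (students.length : Int) < k)]
      rw [idxC_nil 0 students.length k.toNat (by omega)]
      simp
    · rw [if_neg (by omega : ¬ (k < 0 ∨ (students.length : Int) < k))]
      rw [range_eq_consecFrom]
      have hV := Vv_consecFrom students.length k.toNat 0 0 le_rfl (by omega)
      have hfirst := sfx_first students.length k.toNat 0 (by omega)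
      have hflen : (sfx students.length 0 (consecFrom 0 k.toNat)).length ≤ 2 ^ students.length := by
        rw [hfirst]
        have := length_combinations_le (List.range' 0 (students.length - 0)) k.toNat
        simpa [idxC, List.length_range'] using this
      have hb := B_loop students students.length (2 ^ students.length) (consecFrom 0 k.toNat) 0 hV hflen
      rw [length_consecFrom] at hb
      rw [hb, hfirst]

lemma groups_eq (lst : List String) (k : Int) :
    combine lst k = bGroups lst k := by
  rw [A_main, B_main]

-- ===== VERDICT (by name: the statement is the Claim_ definition above) =====
theorem no_oversubscribed_rooms_spec : Claim_equal_no_oversubscribed_rooms := by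
  intro sp rc _
  unfold Spec_no_oversubscribed_rooms
  simp only [no_oversubscribed_rooms, no_oversubscribed_rooms_alt]
  congr 1
  funext cnf room
  have hsize : (PySem.Dict.ofList sp).size = (PySem.Dict.ofList sp).keys.length := by
    simp [PySem.Dict.keys, PySem.Dict.size]
  rw [hsize]
  split_ifs with h
  · rfl
  · rw [PySem.List.foldl_append_singleton_eq_map, groups_eq]
    congr 1
    apply List.map_congr_left
    intro g _
    rw [PySem.List.foldl_append_singleton_eq_map]
    simp
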